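-- pv_equiv track=rewrite | github.com/unum-cloud/PyStats2MD | pystats2md/helpers.py | table2str
-- ===== SOURCE A (Python) =====
-- from typing import List, Optional, Set
--
-- def table2str(table: List[List[str]]) -> str:
--     lines = list()
--
--     def render_line(cells: List[str]) -> str:
--         line = ' | '.join(cells)
--         line = f'| {line} |'
--         return line
--
--     for idx_row in range(len(table)):
--         cells = table[idx_row]
--         lines.append(render_line(cells))
--         if idx_row == 0:
--             delimeters = [':---'] + [':---:'] * (len(cells) - 1)
--             lines.append(render_line(delimeters))
--     return '\n'.join(lines)
-- ===== SOURCE B (Python) =====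
-- def table2str(table):
--     # Recursive string emitter: builds the markdown directly by structural recursion,
--     # with no list of lines and no str.join.
--     if not table:
--         return ''
--
--     def cells2str(cells):
--         if not cells:
--             return ''
--         if len(cells) == 1:
--             return cells[0]
--         return cells[0] + ' | ' + cells2str(cells[1:])
--
--     def rows2str(rows):
--         if not rows:
--             return ''
--         return '\n| ' + cells2str(rows[0]) + ' |' + rows2str(rows[1:])
--
--     header = table[0]
--     delim = [':---'] + [':---:'] * (len(header) - 1)
--     return '| ' + cells2str(header) + ' |' + rows2str([delim] + table[1:])
-- ===== Notes on version B (the rewrite author's own statement) =====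
-- stated objective: alternative
-- what changed: Replaced A's indexed loop that accumulates a list of joined lines (with an in-loop idx_row==0 branch inserting the delimiter row) and a final '\n'.join by a pair of structural recursions that emit the output string directly, cell by cell and row by row, with no intermediate line list and no str.join.
import Mathlib
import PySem

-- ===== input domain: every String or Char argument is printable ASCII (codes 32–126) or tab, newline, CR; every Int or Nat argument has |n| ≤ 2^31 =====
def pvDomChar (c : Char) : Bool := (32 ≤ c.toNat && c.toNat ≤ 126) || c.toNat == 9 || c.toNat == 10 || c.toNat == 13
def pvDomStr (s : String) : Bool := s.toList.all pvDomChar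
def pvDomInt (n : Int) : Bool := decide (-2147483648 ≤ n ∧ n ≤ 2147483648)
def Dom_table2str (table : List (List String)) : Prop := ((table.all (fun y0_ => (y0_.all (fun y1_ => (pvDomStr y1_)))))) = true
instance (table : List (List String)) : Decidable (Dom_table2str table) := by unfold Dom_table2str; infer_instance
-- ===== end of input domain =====

-- B replaces A's line-list accumulation (indexed loop + in-loop first-row branch + '\n'.join)
-- by structural recursions that emit the markdown string directly; alternative decomposition, same cost.

-- ===== PORT A =====
-- render_line helper of A: ' | '.join(cells) wrapped as f'| {line} |'
def renderLineA (cells : List String) : String :=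
  PySem.Str.join " | " cells |> fun line => "| " ++ line ++ " |"

def table2str (table : List (List String)) : String :=
  -- for idx_row in range(len(table)): cells = table[idx_row]; append; if idx_row == 0 append delimiters
  let lines := (PySem.List.enumerate table).foldl (fun lines p =>
    let cells := p.2
    let lines := lines ++ [renderLineA cells]
    if p.1 == 0 then
      lines ++ [renderLineA (":---" :: List.replicate (cells.length - 1) ":---:")]
    else lines) []
  PySem.Str.join "\n" lines

-- ===== PORT B =====
-- cells2str: recursive ' | ' interleaving of the cells
def cellsB : List String → String
  | [] => ""
  | [c] => c
  | c :: rest => c ++ " | " ++ cellsB rest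

-- rows2str: recursive emission of '\n| cells |' per row
def rowsB : List (List String) → String
  | [] => ""
  | r :: rs => "\n| " ++ cellsB r ++ " |" ++ rowsB rs

def table2str_alt (table : List (List String)) : String :=
  match table with
  | [] => ""
  | header :: body =>
    let delim := ":---" :: List.replicate (header.length - 1) ":---:"
    "| " ++ cellsB header ++ " |" ++ rowsB (delim :: body)

-- ===== PRECONDITION & SPEC =====
def Spec_table2str (table : List (List String)) (out : String) : Prop := out = table2str_alt table
instance (table : List (List String)) (out : String) : Decidable (Spec_table2str table out) := by unfold Spec_table2str; infer_instance

-- ===== CLAIM =====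
def Claim_equal_table2str : Prop := ∀ (table : List (List String)), Dom_table2str table → Spec_table2str table (table2str table)

-- ===== LEMMAS AND PROOFS =====

theorem str_join_nil (sep : String) : PySem.Str.join sep [] = "" := rfl

theorem str_join_singleton (sep x : String) : PySem.Str.join sep [x] = x := by
  simp [PySem.Str.join, PySem.Chars.join_singleton]

theorem str_join_cons_cons (sep x y : String) (l : List String) :
    PySem.Str.join sep (x :: y :: l) = x ++ sep ++ PySem.Str.join sep (y :: l) := by
  simp [PySem.Str.join, PySem.Chars.join_cons_cons]
  rw [String.append_assoc]

-- cells2str coincides with ' | '.join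
theorem cellsB_eq_join (cells : List String) :
    cellsB cells = PySem.Str.join " | " cells := by
  induction cells with
  | nil => rfl
  | cons c rest ih =>
    cases rest with
    | nil => simp [cellsB, str_join_singleton]
    | cons d ds => rw [str_join_cons_cons]; simp [cellsB, ih]

-- '\n'.join of a head line with rendered rows behind it is the head followed by rowsB
theorem join_eq_rowsB (x : String) (rows : List (List String)) :
    PySem.Str.join "\n" (x :: rows.map (fun r => "| " ++ PySem.Str.join " | " r ++ " |"))
      = x ++ rowsB rows := by
  induction rows generalizing x with
  | nil => simp [str_join_singleton, rowsB]
  | cons r rs ih =>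
    rw [List.map_cons, str_join_cons_cons, ih]
    simp only [rowsB, cellsB_eq_join, String.append_assoc]
    congr 1

theorem map_cons_render (d : List String) (t : List (List String)) :
    ("| " ++ PySem.Str.join " | " d ++ " |") ::
        t.map (fun r => "| " ++ PySem.Str.join " | " r ++ " |")
      = (d :: t).map (fun r => "| " ++ PySem.Str.join " | " r ++ " |") := rfl

theorem renderLineA_eq (cells : List String) :
    renderLineA cells = "| " ++ PySem.Str.join " | " cells ++ " |" := rfl

-- the tail of A's loop (start index ≥ 1) never takes the idx==0 branch: it just appends renders
theorem foldl_enumerate_tail (t : List (List String)) (s : Int) (hs : 1 ≤ s)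
    (acc : List String) :
    (PySem.List.enumerate t s).foldl (fun lines p =>
        let cells := p.2
        let lines := lines ++ [renderLineA cells]
        if p.1 == 0 then
          lines ++ [renderLineA (":---" :: List.replicate (cells.length - 1) ":---:")]
        else lines) acc
      = acc ++ t.map (fun r => "| " ++ PySem.Str.join " | " r ++ " |") := by
  induction t generalizing s acc with
  | nil => simp [PySem.List.enumerate_nil]
  | cons x xs ih =>
    rw [PySem.List.enumerate_cons, List.foldl_cons, ih (s + 1) (by omega)]
    simp [renderLineA_eq, show ¬ (s == 0) = true by simp; omega]

-- ===== VERDICT =====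
theorem table2str_spec : Claim_equal_table2str := by
  intro table _
  unfold Spec_table2str table2str table2str_alt
  cases table with
  | nil => simp [PySem.List.enumerate_nil, str_join_nil]
  | cons h t =>
    rw [PySem.List.enumerate_cons, List.foldl_cons, foldl_enumerate_tail t (0 + 1) (by omega)]
    simp only [renderLineA_eq, beq_self_eq_true, if_true, List.nil_append, List.cons_append]
    rw [map_cons_render, join_eq_rowsB]
    simp [cellsB_eq_join, String.append_assoc]
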